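-- pv_equiv track=rewrite | github.com/raeez/chiral-bar-cobar | compute/lib/minimal_model_bar.py | kac_determinant_total_degree
-- ===== SOURCE A (Python) =====
-- def partition_count(n: int) -> int:
--     """Number of partitions of n (p(n))."""
--     if n < 0:
--         return 0
--     if n == 0:
--         return 1
--     # Simple dynamic programming
--     table = [0] * (n + 1)
--     table[0] = 1
--     for k in range(1, n + 1):
--         for m in range(k, n + 1):
--             table[m] += table[m - k]
--     return table[n]
--
-- def kac_determinant_total_degree(level: int) -> int:
--     """Total degree of the Kac determinant at given level.
--
--     deg det_n = sum_{r,s >= 1, rs <= n} p(n - rs).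
--     """
--     total = 0
--     for r in range(1, level + 1):
--         for s in range(1, level + 1):
--             if r * s > level:
--                 continue
--             total += partition_count(level - r * s)
--     return total
-- ===== SOURCE B (Python) =====
-- def kac_determinant_total_degree(level: int) -> int:
--     """Total degree of the Kac determinant at given level.
--
--     Builds the partition table p(0..n) once, then for each r walks only
--     the multiples q = r, 2r, ... <= n (instead of scanning all s and
--     recomputing p each time): total = sum over r of sum_q p(n - q).
--     """
--     if level < 1:
--         return 0
--     n = level
--     p = [0] * (n + 1)
--     p[0] = 1
--     for k in range(1, n + 1):
--         for m in range(k, n + 1):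
--             p[m] += p[m - k]
--     total = 0
--     for r in range(1, n + 1):
--         for q in range(r, n + 1, r):
--             total += p[n - q]
--     return total
-- ===== Notes on version B (the rewrite author's own statement) =====
-- stated objective: faster
-- what changed: B precomputes the partition table once and, per r, iterates only the multiples q=r,2r,...<=n with a stepped range, instead of A's full s-scan with a skip guard that recomputes the whole partition DP for every (r,s) pair.
import Mathlib
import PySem

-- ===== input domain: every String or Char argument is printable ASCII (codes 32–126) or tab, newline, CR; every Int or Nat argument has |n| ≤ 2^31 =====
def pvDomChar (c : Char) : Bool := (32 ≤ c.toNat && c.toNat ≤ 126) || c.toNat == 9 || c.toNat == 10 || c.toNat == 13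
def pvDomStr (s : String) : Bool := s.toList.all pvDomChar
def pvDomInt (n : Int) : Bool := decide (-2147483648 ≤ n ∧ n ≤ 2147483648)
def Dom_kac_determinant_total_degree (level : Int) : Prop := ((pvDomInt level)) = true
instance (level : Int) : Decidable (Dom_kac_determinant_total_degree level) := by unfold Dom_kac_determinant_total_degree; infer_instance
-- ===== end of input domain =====

-- B precomputes the partition table once and walks only multiples q of r (stepped range);
-- A recomputes the full partition DP for every (r,s) pair and skips pairs with r*s > level.

-- the partition DP table of size N+1 (the identical lines `table[0]=1; for k: for m: table[m]+=table[m-k]`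
-- appear verbatim in both Pythons: as the body of A's helper partition_count and inline in Source B)
def dpTable (N : Nat) : List Int :=
  (List.range' 1 N 1).foldl
    (fun t k => (List.range' k (N + 1 - k) 1).foldl
      (fun t m => t.set m (t.getD m 0 + t.getD (m - k) 0)) t)
    ((List.replicate (N + 1) (0 : Int)).set 0 1)

-- ===== PORT A =====
def partition_count (n : Int) : Int :=
  if n < 0 then 0
  else if n = 0 then 1
  else (dpTable n.toNat).getD n.toNat 0

def kac_determinant_total_degree (level : Int) : Int :=
  (List.range' 1 level.toNat 1).foldl
    (fun total r =>
      (List.range' 1 level.toNat 1).foldl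
        (fun total s =>
          if ((r * s : Nat) : Int) > level then total
          else total + partition_count (level - (r * s : Nat))) total)
    0

-- ===== PORT B =====
def kac_determinant_total_degree_alt (level : Int) : Int :=
  if level < 1 then 0
  else
    let N := level.toNat
    let p := dpTable N
    (List.range' 1 N 1).foldl
      (fun total r =>
        (List.range' r (N / r) r).foldl
          (fun total q => total + p.getD (N - q) 0) total)
      0

-- ===== PRECONDITION & SPEC =====
def Spec_kac_determinant_total_degree (level : Int) (out : Int) : Prop := out = kac_determinant_total_degree_alt level
instance (level : Int) (out : Int) : Decidable (Spec_kac_determinant_total_degree level out) := by unfold Spec_kac_determinant_total_degree; infer_instance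

-- ===== CLAIM (what is proved, stated in full; the proofs are below) =====
def Claim_equal_kac_determinant_total_degree : Prop := ∀ (level : Int), Dom_kac_determinant_total_degree level → Spec_kac_determinant_total_degree level (kac_determinant_total_degree level)

-- ===== LEMMAS AND PROOFS =====

-- p(m) counted with parts of size ≤ k (unbounded multiplicity)
def Pk (k m : Nat) : Int :=
  match k with
  | 0 => if m = 0 then 1 else 0
  | k + 1 => Pk k m + (if h : k + 1 ≤ m then Pk (k + 1) (m - (k + 1)) else 0)
termination_by (k, m)
decreasing_by
  · exact Prod.Lex.left _ _ (Nat.lt_succ_self k)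
  · exact Prod.Lex.right _ (by omega)

lemma Pk_stable (k m : Nat) (h : m ≤ k) : Pk k m = Pk m m := by
  induction k with
  | zero => cases Nat.le_zero.mp h; rfl
  | succ k ih =>
    rcases Nat.lt_or_ge m (k+1) with h' | h'
    · rw [show Pk (k+1) m = Pk k m + (if h : k + 1 ≤ m then Pk (k + 1) (m - (k + 1)) else 0) from by rw [Pk]]
      rw [dif_neg (by omega)]
      simpa using ih (by omega)
    · have : m = k + 1 := by omega
      subst this; rfl

lemma getD_set_ne (t : List Int) (m i : Nat) (v : Int) (h : i ≠ m) :
    (t.set m v).getD i 0 = t.getD i 0 := by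
  simp [List.getD, h.symm]

lemma getD_set_eq (t : List Int) (m : Nat) (v : Int) (h : m < t.length) :
    (t.set m v).getD m 0 = v := by
  simp [List.getD, h]

lemma Pk_succ_le (k j : Nat) (h : k + 1 ≤ j) :
    Pk (k + 1) j = Pk k j + Pk (k + 1) (j - (k + 1)) := by
  rw [Pk]; rw [dif_pos h]

lemma Pk_succ_gt (k j : Nat) (h : j < k + 1) : Pk (k + 1) j = Pk k j := by
  rw [Pk]; rw [dif_neg (by omega)]; ring

lemma inner_spec (k N : Nat) (hk : 1 ≤ k) :
    ∀ (c j : Nat) (t : List Int), k ≤ j → j + c = N + 1 → t.length = N + 1 →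
      (∀ i, i < j → t.getD i 0 = Pk k i) →
      (∀ i, j ≤ i → i ≤ N → t.getD i 0 = Pk (k-1) i) →
      ∀ i, i ≤ N →
        ((List.range' j c 1).foldl (fun t m => t.set m (t.getD m 0 + t.getD (m - k) 0)) t).getD i 0
          = Pk k i := by
  intro c
  induction c with
  | zero =>
    intro j t hkj hjc _ H1 _ i hi
    simpa using H1 i (by omega)
  | succ c ih =>
    intro j t hkj hjc hlen H1 H2 i hi
    have hjN : j ≤ N := by omega
    have hstep : List.range' j (c+1) 1 = j :: List.range' (j+1) c 1 := by
      simp [List.range'_succ]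
    rw [hstep, List.foldl_cons]
    have H1' : ∀ i', i' < j + 1 →
        (t.set j (t.getD j 0 + t.getD (j - k) 0)).getD i' 0 = Pk k i' := by
      intro i' hi'
      rcases Nat.lt_or_ge i' j with h' | h'
      · rw [getD_set_ne _ _ _ _ (by omega)]; exact H1 i' h'
      · have hij : i' = j := by omega
        rw [hij, getD_set_eq _ _ _ (by omega)]
        obtain ⟨k', rfl⟩ : ∃ k', k = k' + 1 := ⟨k - 1, by omega⟩
        rw [H2 j le_rfl hjN, H1 (j - (k'+1)) (by omega)]
        simp only [Nat.add_sub_cancel]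
        exact (Pk_succ_le k' j (by omega)).symm
    have H2' : ∀ i', j + 1 ≤ i' → i' ≤ N →
        (t.set j (t.getD j 0 + t.getD (j - k) 0)).getD i' 0 = Pk (k-1) i' := by
      intro i' h1 h2
      rw [getD_set_ne _ _ _ _ (by omega)]
      exact H2 i' (by omega) h2
    exact ih (j+1) _ (by omega) (by omega) (by simpa using hlen) H1' H2' i hi

lemma foldl_set_length (l : List Nat) (k : Nat) :
    ∀ t : List Int,
      (l.foldl (fun t m => t.set m (t.getD m 0 + t.getD (m - k) 0)) t).length = t.length := by
  induction l with
  | nil => intro t; rfl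
  | cons x xs ih => intro t; rw [List.foldl_cons, ih]; simp

lemma outer_spec (N : Nat) :
    ∀ (c K : Nat) (t : List Int), K + c ≤ N → t.length = N + 1 →
      (∀ i, i ≤ N → t.getD i 0 = Pk K i) →
      ∀ i, i ≤ N →
        ((List.range' (K+1) c 1).foldl
          (fun t k => (List.range' k (N + 1 - k) 1).foldl
            (fun t m => t.set m (t.getD m 0 + t.getD (m - k) 0)) t) t).getD i 0
          = Pk (K + c) i := by
  intro c
  induction c with
  | zero =>
    intro K t _ _ H i hi
    simpa using H i hi
  | succ c ih =>
    intro K t hKc hlen H i hi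
    have hstep : List.range' (K+1) (c+1) 1 = (K+1) :: List.range' (K+2) c 1 := by
      simp [List.range'_succ]
    rw [hstep, List.foldl_cons]
    have hinner := inner_spec (K+1) N (by omega) (N + 1 - (K+1)) (K+1) t le_rfl
      (by omega) hlen
      (by
        intro i' hi'
        rw [H i' (by omega)]
        exact (Pk_succ_gt K i' hi').symm)
      (by
        intro i' _ hi'
        simpa using H i' hi')
    have hfin := ih (K+1) _ (by omega)
      (by rw [foldl_set_length]; exact hlen)
      (fun i' hi' => hinner i' hi') i hi
    have heq : K + 1 + c = K + (c+1) := by omega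
    rw [heq] at hfin
    exact hfin

lemma dpTable_spec (N : Nat) : ∀ i, i ≤ N → (dpTable N).getD i 0 = Pk N i := by
  intro i hi
  have h0 : ∀ i, i ≤ N → ((List.replicate (N + 1) (0 : Int)).set 0 1).getD i 0 = Pk 0 i := by
    intro i hi
    rcases Nat.eq_zero_or_pos i with rfl | hpos
    · rw [getD_set_eq _ _ _ (by simp)]
      simp [Pk]
    · rw [getD_set_ne _ _ _ _ (by omega)]
      simp [List.getD, Nat.lt_succ_of_le hi, Pk, Nat.pos_iff_ne_zero.mp hpos]
  have := outer_spec N N 0 _ (by omega) (by simp) h0 i hi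
  simpa [dpTable] using this

lemma pc_eq (j : Nat) : partition_count (j : Int) = Pk j j := by
  cases j with
  | zero => simp [partition_count, Pk]
  | succ j =>
    have h1 : ¬ ((j+1 : Nat) : Int) < 0 := by omega
    have h2 : ((j+1 : Nat) : Int) ≠ 0 := by omega
    simp only [partition_count, if_neg h1, if_neg h2, Int.toNat_natCast]
    exact dpTable_spec (j+1) (j+1) le_rfl

lemma guarded_sum (r N : Nat) (hr : 1 ≤ r) (f : Nat → Int) :
    ∀ n, n ≤ N →
    ((List.range' 1 n 1).map (fun s => if ((r * s : Nat) : Int) > (N : Int) then 0 else f (r * s))).sum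
      = ((List.range' 1 (min n (N / r)) 1).map (fun s => f (r * s))).sum := by
  intro n
  induction n with
  | zero => simp
  | succ n ih =>
    intro hn
    have hcat : List.range' 1 (n+1) 1 = List.range' 1 n 1 ++ [n + 1] := by
      rw [List.range'_concat]; simp [Nat.add_comm]
    by_cases hcase : r * (n+1) ≤ N
    · have hdiv : n + 1 ≤ N / r :=
        (Nat.le_div_iff_mul_le (by omega)).mpr (by rw [Nat.mul_comm]; exact hcase)
      have hmin1 : min (n+1) (N / r) = n + 1 := by omega
      have hmin2 : min n (N / r) = n := by omega
      have hcond : ¬ (((r * (n + 1) : Nat) : Int) > (N : Int)) := by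
        simp only [gt_iff_lt, not_lt]; exact_mod_cast hcase
      rw [hmin1, hcat]
      simp only [List.map_append, List.sum_append, List.map_cons, List.map_nil,
        List.sum_cons, List.sum_nil]
      rw [ih (by omega), hmin2, if_neg hcond]
    · have hNlt : N < r * (n+1) := by omega
      have hdiv : N / r < n + 1 :=
        (Nat.div_lt_iff_lt_mul (by omega)).mpr (by rw [Nat.mul_comm]; exact hNlt)
      have hmin1 : min (n+1) (N / r) = min n (N / r) := by omega
      have hcond : (((r * (n + 1) : Nat) : Int) > (N : Int)) := by
        simp only [gt_iff_lt]; exact_mod_cast hNlt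
      rw [hmin1, hcat]
      simp only [List.map_append, List.sum_append, List.map_cons, List.map_nil,
        List.sum_cons, List.sum_nil]
      rw [ih (by omega), if_pos hcond]
      ring

lemma range'_step_eq (r c : Nat) : List.range' r c r = (List.range' 1 c 1).map (· * r) := by
  induction c with
  | zero => rfl
  | succ c ih =>
    rw [show List.range' r (c+1) r = List.range' r c r ++ [r + r * c] from by
          rw [List.range'_concat],
        show List.range' 1 (c+1) 1 = List.range' 1 c 1 ++ [c + 1] from by
          rw [List.range'_concat]; simp [Nat.add_comm],
        List.map_append, ih]
    have : (c + 1) * r = r + r * c := by ring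
    simp [this]

-- ===== VERDICT (by name: the statement is the Claim_ definition above) =====
theorem kac_determinant_total_degree_spec : Claim_equal_kac_determinant_total_degree := by
  intro level _
  unfold Spec_kac_determinant_total_degree kac_determinant_total_degree kac_determinant_total_degree_alt
  by_cases h : level < 1
  · rw [if_pos h]
    have : level.toNat = 0 := by omega
    simp [this]
  · rw [if_neg h]
    have hN : level = ((level.toNat : Nat) : Int) := by omega
    set N := level.toNat with hNdef
    rw [hN]
    apply PySem.List.foldl_congr_mem
    intro total r hr
    have hr1 : 1 ≤ r := (List.mem_range'_1.mp hr).1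
    have hNr : min N (N / r) = N / r := min_eq_right (Nat.div_le_self N r)
    have eA : (List.range' 1 N 1).foldl
        (fun total s => if ((r * s : Nat) : Int) > ((N : Nat) : Int) then total
          else total + partition_count (((N : Nat) : Int) - ((r * s : Nat) : Int))) total
        = total + ((List.range' 1 N 1).map
            (fun s => if ((r * s : Nat) : Int) > ((N : Nat) : Int) then 0
              else partition_count (((N : Nat) : Int) - ((r * s : Nat) : Int)))).sum := by
      rw [← PySem.List.foldl_add]
      apply PySem.List.foldl_congr_mem
      intro acc s _
      split_ifs <;> ring
    rw [eA, PySem.List.foldl_add]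
    congr 1
    have hguard := guarded_sum r N hr1
      (fun q => partition_count (((N : Nat) : Int) - (q : Int))) N le_rfl
    rw [hNr] at hguard
    rw [hguard, range'_step_eq r (N / r), List.map_map]
    refine congrArg List.sum (List.map_congr_left ?_)
    intro s hs
    have hs1 := List.mem_range'_1.mp hs
    have hsle : s ≤ N / r := by omega
    have hrsN : s * r ≤ N := (Nat.le_div_iff_mul_le (by omega)).mp hsle
    have hrs : r * s ≤ N := by rw [Nat.mul_comm]; exact hrsN
    have hcast : (((N : Nat) : Int) - ((r * s : Nat) : Int)) = (((N - r * s : Nat)) : Int) := by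
      omega
    simp only [Function.comp]
    rw [hcast, pc_eq (N - r * s),
      dpTable_spec N (N - s * r) (by omega), Pk_stable N (N - s * r) (by omega),
      show s * r = r * s from Nat.mul_comm s r]
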